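-- pv_equiv track=rewrite | github.com/danielorsa/poker | poker.py | suit_strength
-- ===== SOURCE A (Python) =====
-- def suit_strength(hand):
--     spades = 0
--     diamonds = 0
--     hearts = 0
--     clubs = 0
--     for i in range(5):
--         if hand[i][-1] == "S":
--             spades += 1
--         elif hand[i][-1] == "D":
--             diamonds += 1
--         elif hand[i][-1] == "H":
--             hearts += 1
--         elif hand[i][-1] == "C":
--             clubs += 1
--
--     strength = max(spades, diamonds, hearts, clubs)
--
--     return strength
-- ===== SOURCE B (Python) =====
-- def suit_strength(hand):
--     best = 0
--     for suit in "SDHC":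
--         count = 0
--         for i in range(5):
--             if hand[i][-1] == suit:
--                 count += 1
--         best = max(best, count)
--     return best
-- ===== Notes on version B (the rewrite author's own statement) =====
-- stated objective: alternative
-- what changed: Inverted the loop nesting: instead of one pass over the five cards dispatching into four suit counters, B loops over the four suit characters and counts matching cards per suit, taking a running max.
import Mathlib
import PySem

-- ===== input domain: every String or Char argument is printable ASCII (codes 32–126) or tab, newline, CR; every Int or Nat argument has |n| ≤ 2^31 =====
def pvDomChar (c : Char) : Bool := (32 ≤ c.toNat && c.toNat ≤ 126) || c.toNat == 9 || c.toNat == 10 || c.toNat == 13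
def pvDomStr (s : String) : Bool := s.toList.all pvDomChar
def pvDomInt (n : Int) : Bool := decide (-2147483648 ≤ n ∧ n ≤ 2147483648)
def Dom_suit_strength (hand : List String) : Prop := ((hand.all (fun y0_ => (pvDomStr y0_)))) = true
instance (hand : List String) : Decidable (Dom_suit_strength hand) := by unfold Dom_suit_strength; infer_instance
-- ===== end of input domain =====

-- B inverts the loop nesting: it loops over the four suit characters and counts matching cards per suit with a running max (alternative decomposition, same cost).

-- hand[i][-1], the card-suit accessor both programs use (none = IndexError)
def pvLast (hand : List String) (i : Int) : Option Char :=
  (PySem.List.pyGet? hand i).bind (fun s => PySem.Str.pyGet? s (-1))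

-- ===== PORT A =====
-- the body of A's for-loop: one card updates one of the four suit counters
def stepA (hand : List String) (st : Int × Int × Int × Int) (i : Int) : Int × Int × Int × Int :=
  if pvLast hand i = some 'S' then (st.1 + 1, st.2.1, st.2.2.1, st.2.2.2)
  else if pvLast hand i = some 'D' then (st.1, st.2.1 + 1, st.2.2.1, st.2.2.2)
  else if pvLast hand i = some 'H' then (st.1, st.2.1, st.2.2.1 + 1, st.2.2.2)
  else if pvLast hand i = some 'C' then (st.1, st.2.1, st.2.2.1, st.2.2.2 + 1)
  else st

def suit_strength (hand : List String) : Int :=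
  let st := (PySem.List.pyRange 0 5 1).foldl (stepA hand) (0, 0, 0, 0)
  max (max (max st.1 st.2.1) st.2.2.1) st.2.2.2

-- ===== PORT B =====
-- B's inner loop: count cards of one suit among the first five
def countB (hand : List String) (suit : Char) (l : List Int) (c : Int) : Int :=
  l.foldl (fun count i => if pvLast hand i = some suit then count + 1 else count) c

def suit_strength_alt (hand : List String) : Int :=
  "SDHC".toList.foldl (fun best suit =>
    max best (countB hand suit (PySem.List.pyRange 0 5 1) 0)) 0

-- ===== PRECONDITION & SPEC =====
-- A evaluates hand[i][-1] for i in range(5): it raises IndexError when the hand has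
-- fewer than 5 cards or one of the first five cards is the empty string.
def Pre_suit_strength (hand : List String) : Prop :=
  5 ≤ hand.length ∧ ∀ s ∈ hand.take 5, s ≠ ""
instance (hand : List String) : Decidable (Pre_suit_strength hand) := by
  unfold Pre_suit_strength; infer_instance

def pvWitness_suit_strength : List String := ["AS", "2D", "3H", "4C", "5S"]

def Spec_suit_strength (hand : List String) (out : Int) : Prop := out = suit_strength_alt hand
instance (hand : List String) (out : Int) : Decidable (Spec_suit_strength hand out) := by unfold Spec_suit_strength; infer_instance

-- ===== CLAIM (what is proved, stated in full; the proofs are below) =====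
def Claim_equal_suit_strength : Prop := ∀ (hand : List String), Dom_suit_strength hand → Pre_suit_strength hand → Spec_suit_strength hand (suit_strength hand)

-- ===== LEMMAS AND PROOFS =====
-- number of indices in l whose card has the given suit
def cnt (hand : List String) (suit : Char) : List Int → Int
  | [] => 0
  | i :: l => (if pvLast hand i = some suit then 1 else 0) + cnt hand suit l

theorem cnt_nonneg (hand : List String) (suit : Char) (l : List Int) : 0 ≤ cnt hand suit l := by
  induction l with
  | nil => simp [cnt]
  | cons i l ih => simp only [cnt]; split_ifs <;> omega

theorem countB_eq (hand : List String) (suit : Char) (l : List Int) (c : Int) :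
    countB hand suit l c = c + cnt hand suit l := by
  induction l generalizing c with
  | nil => simp [countB, cnt]
  | cons i l ih => simp only [countB, List.foldl, cnt] at *; split_ifs <;> rw [ih] <;> omega

theorem stateA_eq (hand : List String) (l : List Int) (a b c d : Int) :
    l.foldl (stepA hand) (a, b, c, d) =
      (a + cnt hand 'S' l, b + cnt hand 'D' l, c + cnt hand 'H' l, d + cnt hand 'C' l) := by
  induction l generalizing a b c d with
  | nil => simp [cnt]
  | cons i l ih =>
    simp only [List.foldl, stepA, cnt]
    split_ifs <;> rw [ih] <;> simp_all <;> omega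


theorem toList_SDHC : "SDHC".toList = ['S', 'D', 'H', 'C'] := by decide

-- ===== VERDICT (by name: the statement is the Claim_ definition above) =====
theorem suit_strength_spec : Claim_equal_suit_strength := by
  intro hand _ _
  show suit_strength hand = suit_strength_alt hand
  simp only [suit_strength, suit_strength_alt, toList_SDHC, List.foldl, stateA_eq, countB_eq]
  have hS := cnt_nonneg hand 'S' (PySem.List.pyRange 0 5 1)
  omega
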